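-- pv_equiv track=rewrite | github.com/tsujik2024/fNIRS_FullCap_OD | preprocessing/average_channels.py | detect_naming_convention
-- ===== SOURCE A (Python) =====
-- from typing import Dict, List, Optional, Tuple
--
-- def detect_naming_convention(column_names: List[str]) -> Optional[str]:
--     """
--     Detect the naming convention used in the data columns.
--
--     Returns:
--         Either 'HbO' or 'O2Hb' convention, or None if undetermined
--     """
--     # First check for standard naming
--     if any('HbO' in col for col in column_names):
--         return 'HbO'
--     elif any('O2Hb' in col for col in column_names):
--         return 'O2Hb'
--     # Also check for _oxy/_deoxy naming
--     elif any('_oxy' in col for col in column_names):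
--         return '_oxy'
--     elif any('_deoxy' in col for col in column_names):
--         return '_deoxy'
--     return None
-- ===== SOURCE B (Python) =====
-- def detect_naming_convention(column_names):
--     """Single pass over the columns recording which markers occur, then
--     resolve by the global priority order HbO > O2Hb > _oxy > _deoxy."""
--     markers = ('HbO', 'O2Hb', '_oxy', '_deoxy')
--     seen = set()
--     for col in column_names:
--         for marker in markers:
--             if marker in col:
--                 seen.add(marker)
--     for marker in markers:
--         if marker in seen:
--             return marker
--     return None
-- ===== Notes on version B (the rewrite author's own statement) =====
-- stated objective: alternative
-- what changed: Replaces four separate any() scans over the column list by a single pass that records which markers were seen in a set, followed by a priority-resolution loop over the four markers.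
import Mathlib
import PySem

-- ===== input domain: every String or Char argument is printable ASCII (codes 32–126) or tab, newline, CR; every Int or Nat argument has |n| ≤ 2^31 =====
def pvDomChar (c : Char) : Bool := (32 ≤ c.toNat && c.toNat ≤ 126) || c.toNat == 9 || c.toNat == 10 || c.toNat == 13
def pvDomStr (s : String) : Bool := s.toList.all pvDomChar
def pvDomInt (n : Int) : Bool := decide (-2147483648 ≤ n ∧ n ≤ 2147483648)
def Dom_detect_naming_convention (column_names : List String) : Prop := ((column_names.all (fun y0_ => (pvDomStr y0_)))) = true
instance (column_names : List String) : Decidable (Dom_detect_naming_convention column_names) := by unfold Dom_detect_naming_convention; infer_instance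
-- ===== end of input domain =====

-- B replaces four separate any() scans by a single pass recording seen markers, plus a priority-resolution step (alternative decomposition, same cost).

-- ===== PORT A =====
def detect_naming_convention (column_names : List String) : Option String :=
  if column_names.any (fun col => PySem.Str.isIn "HbO" col) then some "HbO"
  else if column_names.any (fun col => PySem.Str.isIn "O2Hb" col) then some "O2Hb"
  else if column_names.any (fun col => PySem.Str.isIn "_oxy" col) then some "_oxy"
  else if column_names.any (fun col => PySem.Str.isIn "_deoxy" col) then some "_deoxy"
  else none

-- ===== PORT B =====
-- one column step of B's single pass: add every marker occurring in `col` to the seen-set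
def pvMarkStep (s : PySem.Set String) (col : String) : PySem.Set String :=
  ["HbO", "O2Hb", "_oxy", "_deoxy"].foldl
    (fun s m => if PySem.Str.isIn m col then PySem.Set.add s m else s) s

def detect_naming_convention_alt (column_names : List String) : Option String :=
  let seen := column_names.foldl pvMarkStep PySem.Set.empty
  ["HbO", "O2Hb", "_oxy", "_deoxy"].find? (fun m => PySem.Set.contains seen m)

-- ===== PRECONDITION & SPEC =====
def Spec_detect_naming_convention (column_names : List String) (out : Option String) : Prop := out = detect_naming_convention_alt column_names
instance (column_names : List String) (out : Option String) : Decidable (Spec_detect_naming_convention column_names out) := by unfold Spec_detect_naming_convention; infer_instance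

-- ===== CLAIM (what is proved, stated in full; the proofs are below) =====
def Claim_equal_detect_naming_convention : Prop := ∀ (column_names : List String), Dom_detect_naming_convention column_names → Spec_detect_naming_convention column_names (detect_naming_convention column_names)

-- ===== LEMMAS AND PROOFS =====

-- membership after the inner marker loop of one column step
theorem mem_marker_foldl (col : String) (x : String) :
    ∀ (ms : List String) (s : PySem.Set String),
      (x ∈ ms.foldl (fun s m => if PySem.Str.isIn m col then PySem.Set.add s m else s) s ↔
        x ∈ s ∨ (x ∈ ms ∧ PySem.Str.isIn x col = true)) := by
  intro ms
  induction ms with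
  | nil => intro s; simp
  | cons m rest ih =>
    intro s
    simp only [List.foldl_cons, ih, List.mem_cons]
    by_cases h : PySem.Str.isIn m col = true
    · simp only [h, if_pos, PySem.Set.mem_add]
      constructor
      · rintro ((hs | rfl) | hr)
        · exact Or.inl hs
        · exact Or.inr ⟨Or.inl rfl, h⟩
        · exact Or.inr ⟨Or.inr hr.1, hr.2⟩
      · rintro (hs | ⟨(rfl | hr), hx⟩)
        · exact Or.inl (Or.inl hs)
        · exact Or.inl (Or.inr rfl)
        · exact Or.inr ⟨hr, hx⟩
    · simp only [h, if_neg, Bool.not_eq_true]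
      constructor
      · rintro (hs | hr)
        · exact Or.inl hs
        · exact Or.inr ⟨Or.inr hr.1, hr.2⟩
      · rintro (hs | ⟨(rfl | hr), hx⟩)
        · exact Or.inl hs
        · exact absurd hx h
        · exact Or.inr ⟨hr, hx⟩

theorem mem_seen (x : String) (cols : List String) :
    ∀ (s : PySem.Set String),
      (x ∈ cols.foldl pvMarkStep s ↔
        x ∈ s ∨ (x ∈ ["HbO", "O2Hb", "_oxy", "_deoxy"] ∧
          cols.any (fun col => PySem.Str.isIn x col) = true)) := by
  induction cols with
  | nil => intro s; simp
  | cons c rest ih =>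
    intro s
    simp only [List.foldl_cons, ih, List.any_cons, Bool.or_eq_true]
    rw [show pvMarkStep s c =
      ["HbO", "O2Hb", "_oxy", "_deoxy"].foldl
        (fun s m => if PySem.Str.isIn m c then PySem.Set.add s m else s) s from rfl,
      mem_marker_foldl]
    tauto

theorem contains_seen (x : String) (cols : List String)
    (hx : x ∈ ["HbO", "O2Hb", "_oxy", "_deoxy"]) :
    PySem.Set.contains (cols.foldl pvMarkStep PySem.Set.empty) x =
      cols.any (fun col => PySem.Str.isIn x col) := by
  rcases h : cols.any (fun col => PySem.Str.isIn x col) with _ | _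
  · rw [Bool.eq_false_iff]
    intro hc
    rw [PySem.Set.contains_iff, mem_seen] at hc
    rcases hc with hc | hc
    · simp [PySem.Set.empty] at hc
    · rw [hc.2] at h; cases h
  · rw [PySem.Set.contains_iff, mem_seen]
    exact Or.inr ⟨hx, h⟩

-- ===== VERDICT (by name: the statement is the Claim_ definition above) =====
theorem detect_naming_convention_spec : Claim_equal_detect_naming_convention := by
  intro cols _
  unfold Spec_detect_naming_convention detect_naming_convention detect_naming_convention_alt
  simp only [List.find?]
  rw [contains_seen "HbO" cols (by decide), contains_seen "O2Hb" cols (by decide),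
    contains_seen "_oxy" cols (by decide), contains_seen "_deoxy" cols (by decide)]
  rcases h1 : cols.any (fun col => PySem.Str.isIn "HbO" col) with _ | _
  · rcases h2 : cols.any (fun col => PySem.Str.isIn "O2Hb" col) with _ | _
    · rcases h3 : cols.any (fun col => PySem.Str.isIn "_oxy" col) with _ | _
      · rcases h4 : cols.any (fun col => PySem.Str.isIn "_deoxy" col) with _ | _
        · rfl
        · rfl
      · rfl
    · rfl
  · rfl
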